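-- pv_equiv track=rewrite | github.com/Armandur/AdventOfCode | 2024/2024-3.py | part2
-- ===== SOURCE A (Python) =====
-- def part2(input):
-- 	count = 0
-- 	program = []
-- 	for line in input:
-- 		index = line.find("mul(")
-- 		positions = []
-- 		operations = []
-- 		while index != -1:
-- 			positions.append(index)
-- 			index = line.find("mul(", index+len("mul("))
-- 		for position in positions:
-- 			endParenthesis = line.find(")", position+len("mul(")+3, position+len("mul(")+8)
-- 			if endParenthesis != -1:
-- 				operation = line[position+len("mul("):endParenthesis]
-- 				try:
-- 					if len(operation.split(',')) > 1:
-- 						if " " not in operation.split(',')[0] and " " not in operation.split(',')[1]: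
-- 							operations.append((position, [int(x) for x in operation.split(',')]))
-- 				except ValueError:
-- 					pass
--
-- 		# Part 2 All mul() operations found, search for all do() and don't()
-- 		index = line.find("do()")
-- 		while index != -1:
-- 			operations.append((index, ("do()")))
-- 			index = line.find("do()", index+len("do()"))
--
-- 		index = line.find("don't()")
-- 		while index != -1:
-- 			operations.append((index, ("don't()")))
-- 			index = line.find("don't()", index+len("don't()"))
-- 		program.append(operations)
--
-- 	for line in program:
-- 		line.sort(key=lambda x: x[0])
--
-- 	do = True
-- 	for line in program:
-- 		for operation in line:
-- 			if operation[1] == "do()":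
-- 				do = True
-- 			elif operation[1] == "don't()":
-- 				do = False
-- 			else:
-- 				if do:
-- 					count += operation[1][0] * operation[1][1]
-- 	return count
-- ===== SOURCE B (Python) =====
-- def part2(input):
-- 	count = 0
-- 	enabled = True
-- 	for line in input:
-- 		for i in range(len(line)):
-- 			if line.startswith("do()", i):
-- 				enabled = True
-- 			elif line.startswith("don't()", i):
-- 				enabled = False
-- 			elif line.startswith("mul(", i):
-- 				end = line.find(")", i + 7, i + 12)
-- 				if end != -1:
-- 					parts = line[i + 4:end].split(',')
-- 					if len(parts) > 1 and " " not in parts[0] and " " not in parts[1]: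
-- 						try:
-- 							nums = [int(x) for x in parts]
-- 							if enabled:
-- 								count += nums[0] * nums[1]
-- 						except ValueError:
-- 							pass
-- 	return count
-- ===== Notes on version B (the rewrite author's own statement) =====
-- stated objective: simpler
-- what changed: B replaces A's three per-line find-loops, the intermediate (position, operation) lists, the per-line sort and the final replay pass with a single left-to-right scan per line that toggles the enabled flag and adds validated mul products inline (no intermediate lists, no sort).
import Mathlib
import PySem

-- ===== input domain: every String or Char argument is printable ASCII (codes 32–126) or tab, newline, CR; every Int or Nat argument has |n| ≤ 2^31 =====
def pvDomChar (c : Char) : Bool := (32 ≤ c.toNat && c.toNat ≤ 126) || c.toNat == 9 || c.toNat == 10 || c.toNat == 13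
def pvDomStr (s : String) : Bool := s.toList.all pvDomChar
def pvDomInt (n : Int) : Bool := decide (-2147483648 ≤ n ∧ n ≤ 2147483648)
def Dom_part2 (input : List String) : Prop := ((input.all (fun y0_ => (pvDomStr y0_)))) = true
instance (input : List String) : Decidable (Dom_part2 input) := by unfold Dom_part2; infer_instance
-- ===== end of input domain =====

-- B replaces A's three find-loops + per-line sort + replay with a single left-to-right scan per line
-- that keeps the do/don't flag inline (objective: simpler; same return value).

-- the three literal substrings searched for
def mulPat : List Char := ['m', 'u', 'l', '(']
def doPat : List Char := ['d', 'o', '(', ')']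
def dontPat : List Char := ['d', 'o', 'n', '\'', 't', '(', ')']

-- ===== PORT A =====

-- A stores heterogeneous second components: a list of ints for mul, the literal string for do()/don't()
inductive PyVal
  | str : List Char → PyVal
  | ints : List Int → PyVal
deriving DecidableEq, Repr

-- A's `while index != -1: positions.append(index); index = line.find(pat, index+len(pat))` loops;
-- fuel only makes the loop total (callers pass fuel larger than the iteration count, see occ_findAllA)
def findAllA (line pat : List Char) : Nat → Int → List Int
  | 0, _ => []
  | fuel + 1, index =>
    if index = -1 then []
    else index :: findAllA line pat fuel (PySem.Chars.findFrom line pat (index + (pat.length : Int)) none)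

-- body of A's `for position in positions` loop: the validated list of ints, or none when skipped
-- (indices parts[0]/parts[1] are guarded by the length test, so the total pyGetD is exact here)
def tryOpA (line : List Char) (position : Int) : Option (List Int) :=
  let endParenthesis := PySem.Chars.findFrom line [')'] (position + 4 + 3) (some (position + 4 + 8))
  if endParenthesis ≠ -1 then
    let operation := PySem.List.slice line (some (position + 4)) (some endParenthesis)
    let parts := PySem.Chars.splitOn operation [',']
    if parts.length > 1 then
      if ¬ PySem.Chars.isIn [' '] (PySem.List.pyGetD parts 0 []) ∧
         ¬ PySem.Chars.isIn [' '] (PySem.List.pyGetD parts 1 []) then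
        parts.mapM PySem.Int.ofChars?   -- [int(x) for x in …]; any ValueError skips the append
      else none
    else none
  else none

def lineOpsA (line : List Char) : List (Int × PyVal) :=
  let positions := findAllA line mulPat (line.length + 1) (PySem.Chars.find line mulPat)
  let operations := positions.foldl (fun ops position =>
    match tryOpA line position with
    | some nums => ops ++ [(position, PyVal.ints nums)]
    | none => ops) []
  let operations := (findAllA line doPat (line.length + 1) (PySem.Chars.find line doPat)).foldl
    (fun ops index => ops ++ [(index, PyVal.str doPat)]) operations
  (findAllA line dontPat (line.length + 1) (PySem.Chars.find line dontPat)).foldl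
    (fun ops index => ops ++ [(index, PyVal.str dontPat)]) operations

-- the replay loop body; state is (count, do); mul entries have ≥ 2 ints, so pyGetD is exact
def applyOpA (st : Int × Bool) (operation : Int × PyVal) : Int × Bool :=
  if operation.2 = PyVal.str doPat then (st.1, true)
  else if operation.2 = PyVal.str dontPat then (st.1, false)
  else match operation.2 with
    | PyVal.ints nums =>
        if st.2 then (st.1 + PySem.List.pyGetD nums 0 0 * PySem.List.pyGetD nums 1 0, st.2) else st
    | PyVal.str _ => st   -- unreachable: only doPat/dontPat strings are ever stored

def part2 (input : List String) : Int :=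
  let program := input.foldl (fun program line => program ++ [lineOpsA line.toList]) []
  let program := program.map (fun line => PySem.List.sorted line (fun x => x.1))
  (program.foldl (fun st line => line.foldl applyOpA st) (0, true)).1

-- ===== PORT B =====

-- one step of B's scan at index i of the line; state is (count, enabled)
def stepB (line : List Char) (st : Int × Bool) (i : Int) : Int × Bool :=
  if PySem.Chars.startswith (PySem.List.slice line (some i) none) doPat then (st.1, true)
  else if PySem.Chars.startswith (PySem.List.slice line (some i) none) dontPat then (st.1, false)
  else if PySem.Chars.startswith (PySem.List.slice line (some i) none) mulPat then
    let endP := PySem.Chars.findFrom line [')'] (i + 7) (some (i + 12))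
    if endP ≠ -1 then
      let parts := PySem.Chars.splitOn (PySem.List.slice line (some (i + 4)) (some endP)) [',']
      if parts.length > 1 ∧ ¬ PySem.Chars.isIn [' '] (PySem.List.pyGetD parts 0 []) ∧
         ¬ PySem.Chars.isIn [' '] (PySem.List.pyGetD parts 1 []) then
        match parts.mapM PySem.Int.ofChars? with
        | some nums =>
            if st.2 then (st.1 + PySem.List.pyGetD nums 0 0 * PySem.List.pyGetD nums 1 0, st.2) else st
        | none => st
      else st
    else st
  else st

def part2_alt (input : List String) : Int :=
  (input.foldl (fun st line =>
    (PySem.List.pyRange 0 line.toList.length 1).foldl (stepB line.toList) st) (0, true)).1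

-- ===== PRECONDITION & SPEC =====
def Spec_part2 (input : List String) (out : Int) : Prop := out = part2_alt input
instance (input : List String) (out : Int) : Decidable (Spec_part2 input out) := by unfold Spec_part2; infer_instance

-- ===== CLAIM (what is proved, stated in full; the proofs are below) =====
def Claim_equal_part2 : Prop := ∀ (input : List String), Dom_part2 input → Spec_part2 input (part2 input)

-- ===== LEMMAS AND PROOFS =====

-- the event A's sorted replay (and B's scan) sees at index i, if any
def eventAt (cs : List Char) (i : Int) : Option (Int × PyVal) :=
  if PySem.Chars.startswith (cs.drop i.toNat) doPat then some (i, PyVal.str doPat)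
  else if PySem.Chars.startswith (cs.drop i.toNat) dontPat then some (i, PyVal.str dontPat)
  else if PySem.Chars.startswith (cs.drop i.toNat) mulPat then
    (tryOpA cs i).map (fun nums => (i, PyVal.ints nums))
  else none

lemma prefix_drop_getElem? {p cs : List Char} {a j : Nat} (h : p <+: cs.drop a)
    (hj : j < p.length) : cs[a + j]? = p[j]? := by
  have hlen : p.length ≤ (cs.drop a).length := h.length_le
  have hj2 : j < (cs.drop a).length := lt_of_lt_of_le hj hlen
  have haj : a + j < cs.length := by
    have := cs.length_drop (i := a); omega
  have := h.getElem (i := j) hj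
  rw [List.getElem_drop] at this
  rw [List.getElem?_eq_getElem hj, List.getElem?_eq_getElem haj, this]

lemma no_self_overlap {pat cs : List Char} (h0 : ∀ o : Nat, 0 < o → o < pat.length → pat[0]? ≠ pat[o]?)
    {a b : Nat} (h1 : pat <+: cs.drop a) (h2 : pat <+: cs.drop b)
    (hab : a < b) (hb : b < a + pat.length) : False := by
  have hlen : 0 < pat.length := by omega
  have e1 : cs[a + (b - a)]? = pat[b - a]? := prefix_drop_getElem? h1 (by omega)
  have e2 : cs[b + 0]? = pat[0]? := prefix_drop_getElem? h2 hlen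
  have : a + (b - a) = b + 0 := by omega
  rw [this, e2] at e1
  exact h0 (b - a) (by omega) (by omega) e1


lemma distinct_prefix {p q s : List Char} {j : Nat} (hp : p <+: s) (hq : q <+: s)
    (hjp : j < p.length) (hjq : j < q.length) (hne : p[j]? ≠ q[j]?) : False := by
  have e1 : s[0 + j]? = p[j]? := prefix_drop_getElem? (by simpa using hp) hjp
  have e2 : s[0 + j]? = q[j]? := prefix_drop_getElem? (by simpa using hq) hjq
  exact hne (e1.symm.trans e2)

-- characterization of A's find-loop: all hit positions from k on, in increasing order
lemma occ_aux (cs pat : List Char) (hp : pat ≠ [])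
    (hov : ∀ o : Nat, 0 < o → o < pat.length → pat[0]? ≠ pat[o]?) :
    ∀ fuel (k : Nat), k ≤ cs.length → cs.length + 1 - k ≤ fuel →
    findAllA cs pat fuel (PySem.Chars.findFrom cs pat (k : Int) none)
      = (PySem.List.pyRange (k : Int) (cs.length : Int) 1).filter
          (fun i => PySem.Chars.startswith (cs.drop i.toNat) pat) := by
  have hpat1 : 1 ≤ pat.length := List.length_pos_iff.2 hp
  intro fuel
  induction fuel with
  | zero => intro k hk hf; omega
  | succ fuel ih =>
    intro k hk hf
    by_cases hr : PySem.Chars.findFrom cs pat (k : Int) none = -1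
    · simp only [findAllA, hr, if_pos]
      symm
      apply List.filter_eq_nil_iff.2
      intro i hi
      have hmem := PySem.List.mem_pyRange_one.1 hi
      simp only [Bool.not_eq_true]
      rw [← Bool.not_eq_true]
      intro hsw
      have hpre : pat <+: cs.drop i.toNat := (PySem.Chars.startswith_iff _ _).1 hsw
      have hinf : pat <:+: cs.drop k := by
        have hd : cs.drop i.toNat = (cs.drop k).drop (i.toNat - k) := by
          rw [List.drop_drop]
          congr 1
          omega
        rw [hd] at hpre
        exact hpre.isInfix.trans (List.drop_suffix _ _).isInfix
      exact ((PySem.Chars.findFrom_natCast_eq_neg_one_iff cs pat k hk).1 hr) hinf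
    · obtain ⟨hkr, hpre, hmin⟩ := PySem.Chars.findFrom_natCast_spec cs pat k hk hr
      set r := PySem.Chars.findFrom cs pat (k : Int) none with hrdef
      have hr0 : 0 ≤ r := le_trans (Int.natCast_nonneg k) hkr
      have hkrn : k ≤ r.toNat := Int.le_toNat hr0 |>.2 hkr
      have hrn : r.toNat + pat.length ≤ cs.length := by
        have h1 := hpre.length_le
        rw [List.length_drop] at h1
        omega
      have hcast : ((r.toNat + pat.length : Nat) : Int) = r + (pat.length : Int) := by
        push_cast
        rw [Int.toNat_of_nonneg hr0]
      simp only [findAllA, hr, if_false]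
      rw [← hcast, ih (r.toNat + pat.length) (by omega) (by omega)]
      have hswr : PySem.Chars.startswith (cs.drop r.toNat) pat = true :=
        (PySem.Chars.startswith_iff _ _).2 hpre
      have hA : (k : Int) ≤ ((r.toNat + pat.length : Nat) : Int) := by
        exact_mod_cast (by omega : k ≤ r.toNat + pat.length)
      have hB : ((r.toNat + pat.length : Nat) : Int) ≤ (cs.length : Int) := by exact_mod_cast hrn
      have hC : r ≤ ((r.toNat + pat.length : Nat) : Int) := by rw [hcast]; omega
      have hD : r < ((r.toNat + pat.length : Nat) : Int) := by rw [hcast]; omega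
      have hf1 : (PySem.List.pyRange (k : Int) r 1).filter
          (fun i => PySem.Chars.startswith (cs.drop i.toNat) pat) = [] := by
        apply List.filter_eq_nil_iff.2
        intro i hi
        have hmem := PySem.List.mem_pyRange_one.1 hi
        simp only [Bool.not_eq_true]
        rw [← Bool.not_eq_true]
        intro hsw
        exact hmin i.toNat (by omega) (by omega) ((PySem.Chars.startswith_iff _ _).1 hsw)
      have hf2 : (PySem.List.pyRange (r + 1) ((r.toNat + pat.length : Nat) : Int) 1).filter
          (fun i => PySem.Chars.startswith (cs.drop i.toNat) pat) = [] := by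
        apply List.filter_eq_nil_iff.2
        intro i hi
        have hmem := PySem.List.mem_pyRange_one.1 hi
        simp only [Bool.not_eq_true]
        rw [← Bool.not_eq_true]
        intro hsw
        have hi0 : 0 ≤ i := by omega
        have hib : r.toNat < i.toNat ∧ i.toNat < r.toNat + pat.length := by
          constructor <;> omega
        exact no_self_overlap hov hpre ((PySem.Chars.startswith_iff _ _).1 hsw) hib.1 hib.2
      rw [PySem.List.pyRange_one_append (k : Int) ((r.toNat + pat.length : Nat) : Int) (cs.length : Int) hA hB,
        PySem.List.pyRange_one_append (k : Int) r ((r.toNat + pat.length : Nat) : Int) hkr hC,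
        PySem.List.pyRange_one_cons hD]
      simp only [List.filter_append, List.filter_cons, hswr, if_pos, hf1, hf2]
      simp only [List.nil_append, List.cons_append]

lemma occ_findAllA (cs pat : List Char) (hp : pat ≠ [])
    (hov : ∀ o : Nat, 0 < o → o < pat.length → pat[0]? ≠ pat[o]?) :
    findAllA cs pat (cs.length + 1) (PySem.Chars.find cs pat)
      = (PySem.List.pyRange 0 (cs.length : Int) 1).filter
          (fun i => PySem.Chars.startswith (cs.drop i.toNat) pat) := by
  have := occ_aux cs pat hp hov (cs.length + 1) 0 (by omega) (by omega)
  simpa using this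

lemma foldl_match_append (cs : List Char) :
    ∀ (l : List Int) (acc : List (Int × PyVal)),
    l.foldl (fun ops position => match tryOpA cs position with
      | some nums => ops ++ [(position, PyVal.ints nums)]
      | none => ops) acc
      = acc ++ l.filterMap (fun p => (tryOpA cs p).map (fun nums => (p, PyVal.ints nums))) := by
  intro l
  induction l with
  | nil => simp
  | cons x t ih =>
      intro acc
      cases hx : tryOpA cs x <;> simp [List.foldl_cons, hx, ih]

lemma foldl_filterMap {α β γ : Type} (e : α → Option β) (f : γ → β → γ) :
    ∀ (l : List α) (st : γ),
    (l.filterMap e).foldl f st = l.foldl (fun st i => match e i with | some x => f st x | none => st) st := by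
  intro l
  induction l with
  | nil => simp
  | cons x t ih =>
      intro st
      cases hx : e x <;> simp [hx, ih]

-- the three kinds of events separately, as functions of the index
def E1 (cs : List Char) (i : Int) : Option (Int × PyVal) :=
  if PySem.Chars.startswith (cs.drop i.toNat) mulPat then
    (tryOpA cs i).map (fun nums => (i, PyVal.ints nums)) else none
def E2 (cs : List Char) (i : Int) : Option (Int × PyVal) :=
  if PySem.Chars.startswith (cs.drop i.toNat) doPat then some (i, PyVal.str doPat) else none
def E3 (cs : List Char) (i : Int) : Option (Int × PyVal) :=
  if PySem.Chars.startswith (cs.drop i.toNat) dontPat then some (i, PyVal.str dontPat) else none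

lemma mutex_do_mul {s : List Char} (h1 : PySem.Chars.startswith s doPat = true)
    (h2 : PySem.Chars.startswith s mulPat = true) : False :=
  distinct_prefix (j := 0) ((PySem.Chars.startswith_iff _ _).1 h1)
    ((PySem.Chars.startswith_iff _ _).1 h2) (by decide) (by decide) (by decide)

lemma mutex_dont_mul {s : List Char} (h1 : PySem.Chars.startswith s dontPat = true)
    (h2 : PySem.Chars.startswith s mulPat = true) : False :=
  distinct_prefix (j := 0) ((PySem.Chars.startswith_iff _ _).1 h1)
    ((PySem.Chars.startswith_iff _ _).1 h2) (by decide) (by decide) (by decide)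

lemma mutex_do_dont {s : List Char} (h1 : PySem.Chars.startswith s doPat = true)
    (h2 : PySem.Chars.startswith s dontPat = true) : False :=
  distinct_prefix (j := 2) ((PySem.Chars.startswith_iff _ _).1 h1)
    ((PySem.Chars.startswith_iff _ _).1 h2) (by decide) (by decide) (by decide)

lemma perm_events (cs : List Char) : ∀ l : List Int,
    (l.filterMap (E1 cs) ++ l.filterMap (E2 cs) ++ l.filterMap (E3 cs)).Perm
      (l.filterMap (eventAt cs)) := by
  intro l
  induction l with
  | nil => simp
  | cons i t ih =>
    by_cases h2 : PySem.Chars.startswith (cs.drop i.toNat) doPat = true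
    · have h1 : PySem.Chars.startswith (cs.drop i.toNat) mulPat = false := by
        rw [← Bool.not_eq_true]; intro h; exact mutex_do_mul h2 h
      have h3 : PySem.Chars.startswith (cs.drop i.toNat) dontPat = false := by
        rw [← Bool.not_eq_true]; intro h; exact mutex_do_dont h2 h
      simp only [List.filterMap_cons, E1, E2, E3, eventAt, h1, h2, h3, if_true,
        Bool.false_eq_true, if_false]
      rw [List.append_assoc, List.cons_append]
      refine List.Perm.trans List.perm_middle (List.Perm.cons _ ?_)
      rw [← List.append_assoc]
      exact ih
    · by_cases h3 : PySem.Chars.startswith (cs.drop i.toNat) dontPat = true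
      · have h1 : PySem.Chars.startswith (cs.drop i.toNat) mulPat = false := by
          rw [← Bool.not_eq_true]; intro h; exact mutex_dont_mul h3 h
        simp only [List.filterMap_cons, E1, E2, E3, eventAt, h1, h2, h3, if_true,
          Bool.false_eq_true, if_false]
        refine List.Perm.trans List.perm_middle (List.Perm.cons _ ?_)
        exact ih
      · by_cases h1 : PySem.Chars.startswith (cs.drop i.toNat) mulPat = true
        · simp only [List.filterMap_cons, E1, E2, E3, eventAt, h1, h2, h3, if_true,
            Bool.false_eq_true, if_false]
          cases ht : tryOpA cs i with
          | none => simpa [ht] using ih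
          | some nums =>
              simp only [Option.map_some]
              exact List.Perm.cons _ ih
        · simp only [List.filterMap_cons, E1, E2, E3, eventAt, h1, h2, h3,
            Bool.false_eq_true, if_false]
          exact ih

lemma eventAt_fst {cs : List Char} {i : Int} {x : Int × PyVal}
    (h : eventAt cs i = some x) : x.1 = i := by
  unfold eventAt at h
  split_ifs at h
  · cases h; rfl
  · cases h; rfl
  · obtain ⟨nums, -, rfl⟩ := Option.map_eq_some_iff.1 h; rfl

lemma pairwise_events (cs : List Char) :
    ((PySem.List.pyRange 0 (cs.length : Int) 1).filterMap (eventAt cs)).Pairwise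
      (fun a b => a.1 < b.1) := by
  rw [List.pairwise_filterMap]
  refine (PySem.List.pairwise_lt_pyRange_one 0 (cs.length : Int)).imp ?_
  intro a b hab x hx y hy
  rw [eventAt_fst hx, eventAt_fst hy]
  exact hab

-- A's per-line list, sorted by position, is exactly the events in index order
lemma sorted_lineOpsA (cs : List Char) :
    PySem.List.sorted (lineOpsA cs) (fun x => x.1)
      = (PySem.List.pyRange 0 (cs.length : Int) 1).filterMap (eventAt cs) := by
  have hmul_ov : ∀ o : Nat, 0 < o → o < mulPat.length → mulPat[0]? ≠ mulPat[o]? := by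
    intro o ho1 ho2; have hb : o < 4 := by simpa [mulPat] using ho2
    interval_cases o <;> decide
  have hdo_ov : ∀ o : Nat, 0 < o → o < doPat.length → doPat[0]? ≠ doPat[o]? := by
    intro o ho1 ho2; have hb : o < 4 := by simpa [doPat] using ho2
    interval_cases o <;> decide
  have hdont_ov : ∀ o : Nat, 0 < o → o < dontPat.length → dontPat[0]? ≠ dontPat[o]? := by
    intro o ho1 ho2; have hb : o < 7 := by simpa [dontPat] using ho2
    interval_cases o <;> decide
  have hlineOps : lineOpsA cs
      = (PySem.List.pyRange 0 (cs.length : Int) 1).filterMap (E1 cs)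
        ++ (PySem.List.pyRange 0 (cs.length : Int) 1).filterMap (E2 cs)
        ++ (PySem.List.pyRange 0 (cs.length : Int) 1).filterMap (E3 cs) := by
    simp only [lineOpsA]
    rw [occ_findAllA cs mulPat (by decide) hmul_ov,
        occ_findAllA cs doPat (by decide) hdo_ov,
        occ_findAllA cs dontPat (by decide) hdont_ov]
    rw [foldl_match_append cs]
    rw [PySem.List.foldl_append_singleton_eq_map, PySem.List.foldl_append_singleton_eq_map]
    simp only [List.nil_append, List.append_assoc]
    congr 1
    · rw [List.filterMap_filter]; rfl
    congr 1
    · rw [← List.filterMap_eq_map, List.filterMap_filter]; rfl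
    · rw [← List.filterMap_eq_map, List.filterMap_filter]; rfl
  refine PySem.List.sorted_eq_of_perm_of_pairwise_lt _ _ _ ?_ ?_
  · rw [hlineOps]
    exact (perm_events cs _).symm
  · exact pairwise_events cs

lemma stepB_eventAt (cs : List Char) (st : Int × Bool) (i : Int) (hi : 0 ≤ i) :
    stepB cs st i = match eventAt cs i with | some x => applyOpA st x | none => st := by
  have e4 : i + 4 + 3 = i + 7 := by ring
  have e8 : i + 4 + 8 = i + 12 := by ring
  simp only [stepB, eventAt, tryOpA, PySem.List.slice_from cs hi, e4, e8]
  by_cases hdo : PySem.Chars.startswith (cs.drop i.toNat) doPat = true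
  · simp [hdo, applyOpA]
  · by_cases hdont : PySem.Chars.startswith (cs.drop i.toNat) dontPat = true
    · have hne : (PyVal.str dontPat = PyVal.str doPat) = False := by simp [doPat, dontPat]
      simp [hdo, hdont, applyOpA, hne]
    · by_cases hmul : PySem.Chars.startswith (cs.drop i.toNat) mulPat = true
      · simp only [hdo, hdont, hmul, if_true, if_false, Bool.false_eq_true]
        split_ifs with h1 h2 h3 <;>
          try (cases hm : (PySem.Chars.splitOn (PySem.List.slice cs (some (i + 4))
            (some (PySem.Chars.findFrom cs [')'] (i + 7) (some (i + 12))))) [',']).mapM PySem.Int.ofChars? <;>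
            simp_all [applyOpA, doPat, dontPat])
      · simp [hdo, hdont, hmul]

lemma line_fold (cs : List Char) (st : Int × Bool) :
    (PySem.List.sorted (lineOpsA cs) (fun x => x.1)).foldl applyOpA st
      = (PySem.List.pyRange 0 (cs.length : Int) 1).foldl (stepB cs) st := by
  rw [sorted_lineOpsA, foldl_filterMap]
  refine (PySem.List.foldl_congr_mem _ _ _ _ ?_).symm
  intro acc i hi
  have h0 : 0 ≤ i := (PySem.List.mem_pyRange_one.1 hi).1
  rw [stepB_eventAt cs acc i h0]
  cases eventAt cs i <;> rfl

-- ===== VERDICT (by name: the statement is the Claim_ definition above) =====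
theorem part2_spec : Claim_equal_part2 := by
  intro input _
  show part2 input = part2_alt input
  simp only [part2, part2_alt]
  rw [PySem.List.foldl_append_singleton_eq_map]
  simp only [List.nil_append, List.map_map, List.foldl_map, Function.comp]
  congr 1
  refine PySem.List.foldl_congr_mem _ _ _ _ ?_
  intro st line _
  simpa using line_fold line.toList st
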